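-- pv_equiv track=rewrite | github.com/grubeljas/taltech-python | KT/kt1/exam.py | sum_half_evens
-- ===== SOURCE A (Python) =====
-- def sum_half_evens(nums: list) -> int:
--     """
--     Return the sum of first half of even ints in the given array.
--
--     If there are odd number of even numbers, then include the middle number.
--
--     sum_half_evens([2, 1, 2, 3, 4]) => 4
--     sum_half_evens([2, 2, 0, 4]) => 4
--     sum_half_evens([1, 3, 5, 8]) => 8
--     sum_half_evens([2, 3, 5, 7, 8, 9, 10, 11]) => 10
--     """
--     even = []
--     sum = 0
--     for n in nums:
--         if n % 2 == 0:
--             even.append(n)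
--     a = len(even) // 2 + 1 if len(even) % 2 == 1 else len(even) // 2
--     for number in even[:a]:
--         sum += number
--     return sum
-- ===== SOURCE B (Python) =====
-- def sum_half_evens(nums: list) -> int:
--     count = 0
--     for n in nums:
--         if n % 2 == 0:
--             count += 1
--     k = (count + 1) // 2
--     s = 0
--     for n in nums:
--         if n % 2 == 0:
--             s += n
--             k -= 1
--             if k == 0:
--                 break
--     return s
-- ===== Notes on version B (the rewrite author's own statement) =====
-- stated objective: alternative
-- what changed: B never builds the intermediate even list: it counts evens in one pass, then re-scans nums summing evens with an early break after ceil(count/2) of them.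
import Mathlib
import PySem

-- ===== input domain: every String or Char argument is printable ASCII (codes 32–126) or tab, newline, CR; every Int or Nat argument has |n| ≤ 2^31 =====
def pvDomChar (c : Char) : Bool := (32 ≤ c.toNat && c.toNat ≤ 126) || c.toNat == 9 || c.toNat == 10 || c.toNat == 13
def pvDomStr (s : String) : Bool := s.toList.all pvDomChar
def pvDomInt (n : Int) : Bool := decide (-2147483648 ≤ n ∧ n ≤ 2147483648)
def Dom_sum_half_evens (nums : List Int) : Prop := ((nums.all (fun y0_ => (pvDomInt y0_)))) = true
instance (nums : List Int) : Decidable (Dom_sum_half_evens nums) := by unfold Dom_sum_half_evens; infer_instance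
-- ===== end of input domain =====

-- B avoids A's intermediate even-list: it counts evens in one pass, then re-scans
-- nums summing evens with an early break after ceil(count/2) of them (alternative decomposition).

-- ===== PORT A =====
def sum_half_evens (nums : List Int) : Int :=
  let even := nums.foldl (fun acc n => if PySem.Int.mod n 2 == 0 then acc ++ [n] else acc) []
  let a : Int :=
    if PySem.Int.mod (even.length : Int) 2 == 1 then PySem.Int.floordiv (even.length : Int) 2 + 1
    else PySem.Int.floordiv (even.length : Int) 2
  (PySem.List.slice even none (some a)).foldl (fun s number => s + number) 0

-- ===== PORT B =====
-- the second loop of Source B: add each even to s, decrement k, break when k hits 0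
def pvAltLoop : List Int → Int → Int → Int
  | [], _, s => s
  | n :: rest, k, s =>
    if PySem.Int.mod n 2 == 0 then
      (if k - 1 == 0 then s + n else pvAltLoop rest (k - 1) (s + n))
    else pvAltLoop rest k s

def sum_half_evens_alt (nums : List Int) : Int :=
  let count := nums.foldl (fun c n => if PySem.Int.mod n 2 == 0 then c + 1 else c) (0 : Int)
  pvAltLoop nums (PySem.Int.floordiv (count + 1) 2) 0

-- ===== PRECONDITION & SPEC =====
def Spec_sum_half_evens (nums : List Int) (out : Int) : Prop := out = sum_half_evens_alt nums
instance (nums : List Int) (out : Int) : Decidable (Spec_sum_half_evens nums out) := by unfold Spec_sum_half_evens; infer_instance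

-- ===== CLAIM (what is proved, stated in full; the proofs are below) =====
def Claim_equal_sum_half_evens : Prop := ∀ (nums : List Int), Dom_sum_half_evens nums → Spec_sum_half_evens nums (sum_half_evens nums)

-- ===== LEMMAS AND PROOFS =====

-- A's counting loop (B's first pass) counts the evens
theorem pvCount_eq (nums : List Int) (c : Int) :
    nums.foldl (fun c n => if PySem.Int.mod n 2 == 0 then c + 1 else c) c
      = c + (((nums.filter (fun n => PySem.Int.mod n 2 == 0)).length : Nat) : Int) := by
  induction nums generalizing c with
  | nil => simp
  | cons n rest ih =>
    cases hb : (PySem.Int.mod n 2 == 0) with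
    | true =>
      simp only [List.foldl_cons, List.filter_cons, hb, if_true, List.length_cons]
      rw [ih]
      push_cast
      ring
    | false =>
      simp only [List.foldl_cons, List.filter_cons, hb, Bool.false_eq_true, if_false]
      exact ih c

-- summation fold
theorem pvSumFold (l : List Int) (s : Int) :
    l.foldl (fun s x => s + x) s = s + l.sum := by
  induction l generalizing s with
  | nil => simp
  | cons x rest ih => simp [ih]; ring

-- B's loop with a positive budget k sums the first k evens
theorem pvAltLoop_pos (nums : List Int) (k s : Int) (hk : 0 < k) :
    pvAltLoop nums k s
      = s + ((nums.filter (fun n => PySem.Int.mod n 2 == 0)).take k.toNat).sum := by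
  induction nums generalizing k s with
  | nil => simp [pvAltLoop]
  | cons n rest ih =>
    cases hb : (PySem.Int.mod n 2 == 0) with
    | true =>
      by_cases h1 : k = 1
      · subst h1
        simp only [pvAltLoop, hb, if_true, List.filter_cons]
        norm_num
      · have hk2 : 0 < k - 1 := by omega
        have hne : (k - 1 == 0) = false := by simp; omega
        simp only [pvAltLoop, hb, if_true, hne, Bool.false_eq_true, if_false]
        rw [ih (k - 1) (s + n) hk2]
        have ht : k.toNat = (k - 1).toNat + 1 := by omega
        simp only [List.filter_cons, hb, if_true, ht, List.take_succ_cons, List.sum_cons]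
        ring
    | false =>
      simp only [pvAltLoop, hb, Bool.false_eq_true, if_false, List.filter_cons]
      exact ih k s hk

-- if there are no evens, B's loop returns s unchanged
theorem pvAltLoop_noeven (nums : List Int) (k s : Int)
    (h : nums.filter (fun n => PySem.Int.mod n 2 == 0) = []) : pvAltLoop nums k s = s := by
  induction nums generalizing k s with
  | nil => simp [pvAltLoop]
  | cons n rest ih =>
    cases hb : (PySem.Int.mod n 2 == 0) with
    | true =>
      exfalso
      simp only [List.filter_cons, hb, if_true] at h
      exact List.cons_ne_nil _ _ h
    | false =>
      simp only [List.filter_cons, hb, Bool.false_eq_true, if_false] at h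
      simp only [pvAltLoop, hb, Bool.false_eq_true, if_false]
      exact ih k s h

-- A's second loop: sum of the slice even[:a] equals sum of the first ceil(len/2)
theorem pvA_take (F : List Int) :
    (PySem.List.slice F none (some
        (if PySem.Int.mod (F.length : Int) 2 == 1 then PySem.Int.floordiv (F.length : Int) 2 + 1
         else PySem.Int.floordiv (F.length : Int) 2))).foldl (fun s number => s + number) 0
      = (F.take ((F.length + 1) / 2)).sum := by
  have hmod : PySem.Int.mod (F.length : Int) 2 = ((F.length % 2 : Nat) : Int) := by
    exact_mod_cast PySem.Int.mod_natCast F.length 2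
  have hdiv : PySem.Int.floordiv (F.length : Int) 2 = ((F.length / 2 : Nat) : Int) := by
    exact_mod_cast PySem.Int.floordiv_natCast F.length 2
  split_ifs with h
  · have hm : F.length % 2 = 1 := by
      have h' : PySem.Int.mod (F.length : Int) 2 = 1 := by simpa using h
      rw [hmod] at h'
      exact_mod_cast h'
    rw [PySem.List.slice_to F (by rw [hdiv]; positivity)]
    rw [pvSumFold]
    have ht : (PySem.Int.floordiv (F.length : Int) 2 + 1).toNat = (F.length + 1) / 2 := by
      rw [hdiv]; omega
    rw [ht]; simp
  · have hm : F.length % 2 = 0 := by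
      have h' : PySem.Int.mod (F.length : Int) 2 ≠ 1 := by simpa using h
      rw [hmod] at h'
      omega
    rw [PySem.List.slice_to F (by rw [hdiv]; positivity)]
    rw [pvSumFold]
    have ht : (PySem.Int.floordiv (F.length : Int) 2).toNat = (F.length + 1) / 2 := by
      rw [hdiv]; omega
    rw [ht]; simp

-- B's second loop with budget ceil(evens/2) sums the first half of the evens
theorem pvB_take (nums : List Int) :
    pvAltLoop nums (((((nums.filter (fun n => PySem.Int.mod n 2 == 0)).length + 1) / 2 : Nat) : Int)) 0
      = ((nums.filter (fun n => PySem.Int.mod n 2 == 0)).take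
          (((nums.filter (fun n => PySem.Int.mod n 2 == 0)).length + 1) / 2)).sum := by
  by_cases h0 : (nums.filter (fun n => PySem.Int.mod n 2 == 0)).length = 0
  · rw [pvAltLoop_noeven nums _ _ (List.length_eq_zero_iff.mp h0)]
    rw [List.length_eq_zero_iff.mp h0]
    simp
  · have hkpos : (0 : Int) < ((((nums.filter (fun n => PySem.Int.mod n 2 == 0)).length + 1) / 2 : Nat) : Int) := by
      have h1 : 1 ≤ ((nums.filter (fun n => PySem.Int.mod n 2 == 0)).length + 1) / 2 := by omega
      exact_mod_cast Nat.lt_of_lt_of_le Nat.zero_lt_one h1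
    rw [pvAltLoop_pos nums _ 0 hkpos]
    rw [Int.toNat_natCast]
    simp

-- ===== VERDICT (by name: the statement is the Claim_ definition above) =====
theorem sum_half_evens_spec : Claim_equal_sum_half_evens := by
  intro nums _
  unfold Spec_sum_half_evens sum_half_evens sum_half_evens_alt
  have heven : nums.foldl (fun acc n => if PySem.Int.mod n 2 == 0 then acc ++ [n] else acc) ([] : List Int)
      = nums.filter (fun n => PySem.Int.mod n 2 == 0) := by
    rw [PySem.List.foldl_append_if_eq_filter]
    simp
  have hcount : nums.foldl (fun c n => if PySem.Int.mod n 2 == 0 then c + 1 else c) (0 : Int)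
      = (((nums.filter (fun n => PySem.Int.mod n 2 == 0)).length : Nat) : Int) := by
    rw [pvCount_eq]; simp
  have hk : PySem.Int.floordiv ((((nums.filter (fun n => PySem.Int.mod n 2 == 0)).length : Nat) : Int) + 1) 2
      = (((((nums.filter (fun n => PySem.Int.mod n 2 == 0)).length + 1) / 2 : Nat) : Int)) := by
    have := PySem.Int.floordiv_natCast ((nums.filter (fun n => PySem.Int.mod n 2 == 0)).length + 1) 2
    push_cast at this ⊢
    exact this
  simp only [heven, hcount, hk]
  rw [pvA_take, pvB_take]
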